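-- pv_equiv track=rewrite | github.com/gperciva/vivi | python/mix_audio_prep.py | filenames_list_contains
-- ===== SOURCE A (Python) =====
-- def filenames_list_contains(filenames, values):
--     if len(filenames) != len(values):
--         return False
--     found = [False] * len(values)
--     for filename in filenames:
--         for i, val in enumerate(values):
--             if val in filename:
--                 found[i] = True
--     if False in found:
--         return False
--     return True
-- ===== SOURCE B (Python) =====
-- def filenames_list_contains(filenames, values):
--     if len(filenames) != len(values):
--         return False
--     pending = list(values)
--     for fn in filenames:
--         pending = [v for v in pending if v not in fn]
--         if not pending:
--             return True
--     return not pending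
-- ===== Notes on version B (the rewrite author's own statement) =====
-- stated objective: alternative
-- what changed: Replaces A's per-index boolean 'found' array (filename-outer loop re-scanning every value each time, then a final 'False in found' scan) with a shrinking worklist: one pass over filenames that filters a 'pending' list of still-unmatched values and returns as soon as it empties, so already-matched values are never examined again.
import Mathlib
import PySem

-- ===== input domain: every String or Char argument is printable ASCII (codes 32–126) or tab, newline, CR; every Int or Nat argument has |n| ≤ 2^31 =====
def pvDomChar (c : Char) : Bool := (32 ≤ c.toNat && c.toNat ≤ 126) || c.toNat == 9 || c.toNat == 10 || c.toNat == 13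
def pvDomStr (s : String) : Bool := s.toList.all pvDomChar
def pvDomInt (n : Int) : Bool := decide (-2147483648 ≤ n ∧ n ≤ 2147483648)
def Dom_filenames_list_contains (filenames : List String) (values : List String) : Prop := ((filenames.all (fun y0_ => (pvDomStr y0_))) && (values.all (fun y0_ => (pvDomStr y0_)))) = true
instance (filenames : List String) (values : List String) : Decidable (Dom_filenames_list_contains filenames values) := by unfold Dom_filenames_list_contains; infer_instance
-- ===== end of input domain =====

-- ===== PORT A =====
-- B replaces A's found-array bookkeeping with a shrinking worklist of unmatched values (alternative); same values everywhere.
def filenames_list_contains (filenames : List String) (values : List String) : Bool :=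
  if filenames.length ≠ values.length then false
  else
    let found : List Bool := List.replicate values.length false
    let found := filenames.foldl
      (fun found filename =>
        (PySem.List.enumerate values 0).foldl
          (fun found p =>
            if PySem.Str.isIn p.2 filename then PySem.List.pySetD found p.1 true else found)
          found)
      found
    if false ∈ found then false else true

-- ===== PORT B =====
-- worklist loop of Source B: filter 'pending' by each filename, early return True when it empties
def pvAltLoop (filenames : List String) (pending : List String) : Bool :=
  match filenames with
  | [] => pending.isEmpty
  | fn :: rest =>
    let pending' := pending.filter (fun v => ! PySem.Str.isIn v fn)
    if pending'.isEmpty then true else pvAltLoop rest pending'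

def filenames_list_contains_alt (filenames : List String) (values : List String) : Bool :=
  if filenames.length ≠ values.length then false
  else pvAltLoop filenames values

-- ===== PRECONDITION & SPEC =====
def Spec_filenames_list_contains (filenames : List String) (values : List String) (out : Bool) : Prop := out = filenames_list_contains_alt filenames values
instance (filenames : List String) (values : List String) (out : Bool) : Decidable (Spec_filenames_list_contains filenames values out) := by unfold Spec_filenames_list_contains; infer_instance

-- ===== CLAIM (what is proved, stated in full; the proofs are below) =====
def Claim_equal_filenames_list_contains : Prop := ∀ (filenames : List String) (values : List String), Dom_filenames_list_contains filenames values → Spec_filenames_list_contains filenames values (filenames_list_contains filenames values)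

-- ===== LEMMAS AND PROOFS =====

-- inner loop: 'for i, val in enumerate(values): if val in filename: found[i] = True'
lemma pv_inner_fold (filename : String) (values : List String) :
    ∀ (pre fd : List Bool), fd.length = values.length →
    (PySem.List.enumerate values (pre.length : Int)).foldl
      (fun found p =>
        if PySem.Str.isIn p.2 filename then PySem.List.pySetD found p.1 true else found)
      (pre ++ fd)
    = pre ++ List.zipWith (fun b v => b || PySem.Str.isIn v filename) fd values := by
  induction values with
  | nil =>
    intro pre fd h
    simp at h
    simp [h, PySem.List.enumerate]
  | cons v vs ih =>
    intro pre fd h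
    cases fd with
    | nil => simp at h
    | cons b bs =>
      simp only [PySem.List.enumerate_cons, List.foldl_cons]
      have key :
          (if PySem.Str.isIn v filename
            then PySem.List.pySetD (pre ++ b :: bs) (pre.length : Int) true
            else pre ++ b :: bs)
          = pre ++ (b || PySem.Str.isIn v filename) :: bs := by
        by_cases hc : PySem.Chars.isIn v.toList filename.toList <;>
          simp [PySem.Str.isIn, hc]
      rw [key]
      have hlen : (pre.length : Int) + 1 = (((pre ++ [b || PySem.Str.isIn v filename]).length : Nat) : Int) := by
        simp
      have hbs : bs.length = vs.length := by simpa using h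
      calc (PySem.List.enumerate vs ((pre.length : Int) + 1)).foldl
              (fun found p =>
                if PySem.Str.isIn p.2 filename then PySem.List.pySetD found p.1 true else found)
              (pre ++ (b || PySem.Str.isIn v filename) :: bs)
          = (PySem.List.enumerate vs (((pre ++ [b || PySem.Str.isIn v filename]).length : Nat) : Int)).foldl
              (fun found p =>
                if PySem.Str.isIn p.2 filename then PySem.List.pySetD found p.1 true else found)
              ((pre ++ [b || PySem.Str.isIn v filename]) ++ bs) := by
            rw [hlen]; simp
        _ = (pre ++ [b || PySem.Str.isIn v filename]) ++
              List.zipWith (fun b v => b || PySem.Str.isIn v filename) bs vs := ih _ _ hbs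
        _ = pre ++ (b || PySem.Str.isIn v filename) ::
              List.zipWith (fun b v => b || PySem.Str.isIn v filename) bs vs := by simp

lemma pv_zipWith_map_self {α β γ : Type} (h : β → α → γ) (g : α → β) :
    ∀ (l : List α), List.zipWith h (l.map g) l = l.map (fun a => h (g a) a) := by
  intro l; induction l with
  | nil => simp
  | cons x xs ih => simp [ih]

-- outer loop over filenames, with the state kept in the form 'values.map g'
lemma pv_outer_fold (values : List String) :
    ∀ (filenames : List String) (g : String → Bool),
    filenames.foldl
      (fun found filename =>
        (PySem.List.enumerate values 0).foldl
          (fun found p =>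
            if PySem.Str.isIn p.2 filename then PySem.List.pySetD found p.1 true else found)
          found)
      (values.map g)
    = values.map (fun v => g v || filenames.any (fun fn => PySem.Str.isIn v fn)) := by
  intro filenames
  induction filenames with
  | nil => intro g; simp
  | cons f fns ih =>
    intro g
    have hstep :
        (PySem.List.enumerate values 0).foldl
          (fun found p =>
            if PySem.Str.isIn p.2 f then PySem.List.pySetD found p.1 true else found)
          (values.map g)
        = values.map (fun v => g v || PySem.Str.isIn v f) := by
      have := pv_inner_fold f values [] (values.map g) (by simp)
      simpa [pv_zipWith_map_self] using this
    rw [List.foldl_cons, hstep, ih (fun v => g v || PySem.Str.isIn v f)]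
    simp [Bool.or_assoc]

-- 'False in found' vs 'all'
lemma pv_mem_false_map (values : List String) (f : String → Bool) :
    (if false ∈ values.map f then false else true) = values.all f := by
  induction values with
  | nil => simp
  | cons v vs ih => by_cases hv : f v = true <;> simp [hv, ← ih]

-- B's worklist loop computes the universal/existential characterisation
lemma pv_altLoop_eq (filenames : List String) :
    ∀ (pending : List String),
    pvAltLoop filenames pending
    = pending.all (fun v => filenames.any (fun fn => PySem.Str.isIn v fn)) := by
  induction filenames with
  | nil =>
    intro pending
    simp [pvAltLoop]
    cases pending <;> simp
  | cons f fns ih =>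
    intro pending
    show (if (pending.filter (fun v => ! PySem.Str.isIn v f)).isEmpty then true
          else pvAltLoop fns (pending.filter (fun v => ! PySem.Str.isIn v f)))
        = pending.all (fun v => (f :: fns).any (fun fn => PySem.Str.isIn v fn))
    have hfilter :
        (pending.filter (fun v => ! PySem.Str.isIn v f)).all
            (fun v => fns.any (fun fn => PySem.Str.isIn v fn))
        = pending.all (fun v => (f :: fns).any (fun fn => PySem.Str.isIn v fn)) := by
      induction pending with
      | nil => simp
      | cons p ps ihp =>
        simp only [List.any_cons, PySem.Str.isIn] at ihp ⊢
        by_cases hp : PySem.Chars.isIn p.toList f.toList = true <;>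
          simp [List.filter_cons, hp, ihp]
    by_cases he : (pending.filter (fun v => ! PySem.Str.isIn v f)).isEmpty = true
    · rw [if_pos he, ← hfilter]
      rw [List.isEmpty_iff] at he
      rw [he]
      simp
    · rw [if_neg he, ih, hfilter]

-- ===== VERDICT (by name: the statement is the Claim_ definition above) =====
theorem filenames_list_contains_spec : Claim_equal_filenames_list_contains := by
  intro filenames values _
  unfold Spec_filenames_list_contains filenames_list_contains filenames_list_contains_alt
  by_cases hl : filenames.length ≠ values.length
  · rw [if_pos hl, if_pos hl]
  · rw [if_neg hl, if_neg hl]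
    have hrep : (List.replicate values.length false) = values.map (fun _ => false) := by
      simp [List.map_const']
    show (if false ∈ filenames.foldl
        (fun found filename =>
          (PySem.List.enumerate values 0).foldl
            (fun found p =>
              if PySem.Str.isIn p.2 filename then PySem.List.pySetD found p.1 true else found)
            found)
        (List.replicate values.length false) then false else true)
      = pvAltLoop filenames values
    rw [hrep, pv_outer_fold values filenames (fun _ => false), pv_altLoop_eq]
    simpa using pv_mem_false_map values (fun v => filenames.any (fun fn => PySem.Str.isIn v fn))
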